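-- pv_equiv track=rewrite | github.com/toniogn/dojos | climb_the_lighthouse_solution.py | previous_steps_number
-- ===== SOURCE A (Python) =====
-- def previous_steps_number(step_index: int) -> int:
--     """Counts the number of steps leading to the one identified by its index.
--
--     Parameters
--     ----------
--     step_index : int
--         Index of the current step.
--
--     Returns
--     -------
--     int
--         Number of steps from which one can reach the current one.
--     """
--     if step_index >= 1:
--         return previous_steps_number(step_index - 1) + previous_steps_number(
--             step_index - 2
--         )
--     elif step_index == 0:
--         return 1
--     elif step_index < 0:
--         return 0
-- ===== SOURCE B (Python) =====
-- def previous_steps_number(step_index: int) -> int: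
--     """Counts the number of steps leading to the one identified by its index."""
--     if step_index < 0:
--         return 0
--     prev, cur = 0, 1
--     for _ in range(step_index):
--         prev, cur = cur, prev + cur
--     return cur
-- ===== Notes on version B (the rewrite author's own statement) =====
-- stated objective: alternative
-- what changed: Replaced the exponential double recursion with a single iterative loop carrying the last two values (bottom-up DP).
import Mathlib
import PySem

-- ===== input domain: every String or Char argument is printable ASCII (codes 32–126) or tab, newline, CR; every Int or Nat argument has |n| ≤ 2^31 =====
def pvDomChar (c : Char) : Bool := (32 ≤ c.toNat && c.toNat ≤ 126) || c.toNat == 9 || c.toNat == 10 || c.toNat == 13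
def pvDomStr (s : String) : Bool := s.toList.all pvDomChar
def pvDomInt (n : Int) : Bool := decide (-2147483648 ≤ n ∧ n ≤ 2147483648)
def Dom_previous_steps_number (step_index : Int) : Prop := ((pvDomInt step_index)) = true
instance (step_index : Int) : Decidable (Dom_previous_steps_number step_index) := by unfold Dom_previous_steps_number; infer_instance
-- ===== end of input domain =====

-- B replaces A's exponential double recursion with a single iterative loop carrying the last two values (bottom-up DP): a genuinely different algorithm of lower asymptotic cost (a timing run could not confirm a measured speed-up because A rarely finishes).


-- ===== PORT A =====
def previous_steps_number (step_index : Int) : Int :=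
  if step_index ≥ 1 then
    previous_steps_number (step_index - 1) + previous_steps_number (step_index - 2)
  else if step_index = 0 then 1
  else 0
termination_by step_index.toNat
decreasing_by all_goals omega

-- ===== PORT B =====
def previous_steps_number_alt (step_index : Int) : Int :=
  if step_index < 0 then 0
  else ((List.range step_index.toNat).foldl
          (fun (pc : Int × Int) _ => (pc.2, pc.1 + pc.2)) (0, 1)).2

-- ===== PRECONDITION & SPEC =====
-- Pre_ excludes large step_index: there A's recursion descends step_index frames deep and raises
-- RecursionError at CPython's recursion limit (the bound leaves a margin for interpreter frames already
-- on the stack); A returns no value on any excluded input.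
def Pre_previous_steps_number (step_index : Int) : Prop := step_index < 950
instance (step_index : Int) : Decidable (Pre_previous_steps_number step_index) := by unfold Pre_previous_steps_number; infer_instance
def pvWitness_previous_steps_number : Int := (10)

def Spec_previous_steps_number (step_index : Int) (out : Int) : Prop := out = previous_steps_number_alt step_index
instance (step_index : Int) (out : Int) : Decidable (Spec_previous_steps_number step_index out) := by unfold Spec_previous_steps_number; infer_instance

-- ===== CLAIM (what is proved, stated in full; the proofs are below) =====
def Claim_equal_previous_steps_number : Prop := ∀ (step_index : Int), Dom_previous_steps_number step_index → Pre_previous_steps_number step_index → Spec_previous_steps_number step_index (previous_steps_number step_index)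

-- ===== LEMMAS AND PROOFS =====

def pvPair (k : Nat) : Int × Int :=
  (List.range k).foldl (fun (pc : Int × Int) _ => (pc.2, pc.1 + pc.2)) (0, 1)

theorem pvPair_succ (k : Nat) :
    pvPair (k + 1) = ((pvPair k).2, (pvPair k).1 + (pvPair k).2) := by
  simp [pvPair, List.range_succ]

theorem pvA_neg {n : Int} (h : n < 0) : previous_steps_number n = 0 := by
  rw [previous_steps_number]
  simp [show ¬ n ≥ 1 by omega, show n ≠ 0 by omega]

-- loop invariant: pvPair k = (A (k-1), A k)
theorem pvPair_eq (k : Nat) :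
    pvPair k = (previous_steps_number ((k : Int) - 1), previous_steps_number (k : Int)) := by
  induction k with
  | zero =>
      have h0 : previous_steps_number 0 = 1 := by rw [previous_steps_number]; simp
      have hm : previous_steps_number (-1) = 0 := pvA_neg (by omega)
      simp [pvPair, h0, hm]
  | succ k ih =>
      rw [pvPair_succ, ih]
      have h1 : ((k + 1 : Nat) : Int) ≥ 1 := by push_cast; omega
      have : previous_steps_number ((k + 1 : Nat) : Int)
          = previous_steps_number (((k + 1 : Nat) : Int) - 1)
            + previous_steps_number (((k + 1 : Nat) : Int) - 2) := by
        rw [previous_steps_number]; simp [show (1:Int) ≤ (k:Int)+1 by omega]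
      rw [this]
      have e1 : (((k + 1 : Nat) : Int) - 1) = (k : Int) := by push_cast; omega
      have e2 : (((k + 1 : Nat) : Int) - 2) = (k : Int) - 1 := by push_cast; omega
      rw [e1, e2]
      ring_nf

-- ===== VERDICT (by name: the statement is the Claim_ definition above) =====
theorem previous_steps_number_spec : Claim_equal_previous_steps_number := by
  intro n _ _
  unfold Spec_previous_steps_number previous_steps_number_alt
  by_cases h : n < 0
  · simp [h, pvA_neg h]
  · have hn : ((n.toNat : Nat) : Int) = n := by omega
    simp only [h, if_false]
    rw [show (List.range n.toNat).foldl (fun (pc : Int × Int) _ => (pc.2, pc.1 + pc.2)) (0, 1) = pvPair n.toNat from rfl,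
        pvPair_eq, hn]
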